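-- pv_equiv track=rewrite | github.com/johnmichaelkuczynski/branimaniac.xyz | server/kuczynski_engine.py | _get_viewpoint
-- ===== SOURCE A (Python) =====
-- from typing import List, Dict
--
-- def _get_viewpoint(rule: Dict) -> str:
--     """Determine philosophical viewpoint from rule content"""
--     premise = rule.get('premise', '').lower()
--     conclusion = rule.get('conclusion', '').lower()
--     combined = premise + " " + conclusion
--
--     # Philosophy of Language / Semantics
--     if any(term in combined for term in ['proposition', 'meaning', 'semantic', 'reference', 'sense', 'denotation', 'intension']):
--         return 'semantic'
--     # Epistemology
--     elif any(term in combined for term in ['knowledge', 'belief', 'justif', 'a priori', 'apriori', 'epistemic', 'certainty']):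
--         return 'epistemological'
--     # Metaphysics
--     elif any(term in combined for term in ['exist', 'being', 'identity', 'property', 'modal', 'possible world', 'essence', 'ontolog']):
--         return 'metaphysical'
--     # Logic
--     elif any(term in combined for term in ['logic', 'valid', 'inference', 'deduct', 'proof', 'theorem', 'axiom', 'incompleteness']):
--         return 'logical'
--     # Philosophy of Mind
--     elif any(term in combined for term in ['mental', 'consciousness', 'intentional', 'thought', 'cognitive', 'mind', 'representation']):
--         return 'philosophy of mind'
--     # Critique of Russell
--     elif any(term in combined for term in ['russell', 'definite description', 'theory of descriptions']):
--         return 'anti-Russellian'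
--     # Critique of Empiricism
--     elif any(term in combined for term in ['empiric', 'sense data', 'experience', 'observation', 'induction']):
--         return 'rationalist'
--     # Psychology / Psychoanalysis
--     elif any(term in combined for term in ['psycho', 'unconscious', 'neurosis', 'defense', 'ocd', 'anxiety']):
--         return 'psychological'
--     # Paradoxes
--     elif any(term in combined for term in ['paradox', 'sorites', 'vagueness', 'contradiction']):
--         return 'paradox-theoretical'
--     else:
--         return 'analytical'
-- ===== SOURCE B (Python) =====
-- _LABELS = ['semantic', 'epistemological', 'metaphysical', 'logical',
--            'philosophy of mind', 'anti-Russellian', 'rationalist',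
--            'psychological', 'paradox-theoretical']
--
-- _TERMS = [
--     ['proposition', 'meaning', 'semantic', 'reference', 'sense', 'denotation', 'intension'],
--     ['knowledge', 'belief', 'justif', 'a priori', 'apriori', 'epistemic', 'certainty'],
--     ['exist', 'being', 'identity', 'property', 'modal', 'possible world', 'essence', 'ontolog'],
--     ['logic', 'valid', 'inference', 'deduct', 'proof', 'theorem', 'axiom', 'incompleteness'],
--     ['mental', 'consciousness', 'intentional', 'thought', 'cognitive', 'mind', 'representation'],
--     ['russell', 'definite description', 'theory of descriptions'],
--     ['empiric', 'sense data', 'experience', 'observation', 'induction'],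
--     ['psycho', 'unconscious', 'neurosis', 'defense', 'ocd', 'anxiety'],
--     ['paradox', 'sorites', 'vagueness', 'contradiction'],
-- ]
--
-- # flat term -> priority index dictionary and the distinct term lengths,
-- # for a position-driven multi-pattern scan of the text
-- _TERM_PRIORITY = {t: p for p, terms in enumerate(_TERMS) for t in terms}
-- _LENGTHS = sorted({len(t) for t in _TERM_PRIORITY})
--
--
-- def _get_viewpoint(rule):
--     """Determine philosophical viewpoint from rule content"""
--     combined = rule.get('premise', '').lower() + " " + rule.get('conclusion', '').lower()
--     # single left-to-right scan of the text: at each position, look up every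
--     # candidate-length window in the term dictionary and keep the best
--     # (lowest-index = highest-priority) category seen anywhere
--     best = len(_LABELS)
--     for i in range(len(combined)):
--         for L in _LENGTHS:
--             p = _TERM_PRIORITY.get(combined[i:i + L], best)
--             if p < best:
--                 best = p
--     return _LABELS[best] if best < len(_LABELS) else 'analytical'
-- ===== Notes on version B (the rewrite author's own statement) =====
-- stated objective: alternative
-- what changed: Replaces the per-term 'term in combined' if/elif chain by a position-driven multi-pattern scan: one left-to-right pass over the text that looks up each candidate-length window in a flat term->priority dictionary and keeps the minimum priority, returning that label (or 'analytical').
import Mathlib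
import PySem

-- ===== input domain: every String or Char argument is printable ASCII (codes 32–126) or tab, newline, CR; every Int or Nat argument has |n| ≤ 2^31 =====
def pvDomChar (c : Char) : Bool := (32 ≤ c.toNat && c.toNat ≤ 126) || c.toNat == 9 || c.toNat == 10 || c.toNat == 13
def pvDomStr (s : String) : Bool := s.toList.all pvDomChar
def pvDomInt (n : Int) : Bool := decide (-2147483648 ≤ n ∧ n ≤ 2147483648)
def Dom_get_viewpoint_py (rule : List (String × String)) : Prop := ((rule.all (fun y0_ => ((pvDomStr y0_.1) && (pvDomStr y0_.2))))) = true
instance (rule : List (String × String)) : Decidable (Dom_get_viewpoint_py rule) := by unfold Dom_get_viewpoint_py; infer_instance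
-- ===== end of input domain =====

-- B replaces A's per-term 'term in combined' if/elif chain by a position-driven multi-pattern
-- scan: one pass over the text, looking up each candidate-length window in a flat
-- term → priority dictionary and keeping the minimum priority (alternative algorithm, same result).
-- Return-value equivalence only.

-- ===== PORT A =====
-- literal port of A's if/elif chain; 'term in combined' = PySem.Chars.isIn on lowered char lists
def get_viewpoint_py (rule : List (String × String)) : String :=
  let premise := PySem.Chars.lower ((PySem.Dict.mk rule).getD "premise" "").toList
  let conclusion := PySem.Chars.lower ((PySem.Dict.mk rule).getD "conclusion" "").toList
  let combined := premise ++ [' '] ++ conclusion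
  if (["proposition", "meaning", "semantic", "reference", "sense", "denotation", "intension"] : List String).any (fun t => PySem.Chars.isIn t.toList combined) then "semantic"
  else if (["knowledge", "belief", "justif", "a priori", "apriori", "epistemic", "certainty"] : List String).any (fun t => PySem.Chars.isIn t.toList combined) then "epistemological"
  else if (["exist", "being", "identity", "property", "modal", "possible world", "essence", "ontolog"] : List String).any (fun t => PySem.Chars.isIn t.toList combined) then "metaphysical"
  else if (["logic", "valid", "inference", "deduct", "proof", "theorem", "axiom", "incompleteness"] : List String).any (fun t => PySem.Chars.isIn t.toList combined) then "logical"
  else if (["mental", "consciousness", "intentional", "thought", "cognitive", "mind", "representation"] : List String).any (fun t => PySem.Chars.isIn t.toList combined) then "philosophy of mind"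
  else if (["russell", "definite description", "theory of descriptions"] : List String).any (fun t => PySem.Chars.isIn t.toList combined) then "anti-Russellian"
  else if (["empiric", "sense data", "experience", "observation", "induction"] : List String).any (fun t => PySem.Chars.isIn t.toList combined) then "rationalist"
  else if (["psycho", "unconscious", "neurosis", "defense", "ocd", "anxiety"] : List String).any (fun t => PySem.Chars.isIn t.toList combined) then "psychological"
  else if (["paradox", "sorites", "vagueness", "contradiction"] : List String).any (fun t => PySem.Chars.isIn t.toList combined) then "paradox-theoretical"
  else "analytical"

-- ===== PORT B =====
def pvLabels : List String :=
  ["semantic", "epistemological", "metaphysical", "logical", "philosophy of mind",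
   "anti-Russellian", "rationalist", "psychological", "paradox-theoretical"]

def pvTermLists : List (List String) :=
  [["proposition", "meaning", "semantic", "reference", "sense", "denotation", "intension"],
   ["knowledge", "belief", "justif", "a priori", "apriori", "epistemic", "certainty"],
   ["exist", "being", "identity", "property", "modal", "possible world", "essence", "ontolog"],
   ["logic", "valid", "inference", "deduct", "proof", "theorem", "axiom", "incompleteness"],
   ["mental", "consciousness", "intentional", "thought", "cognitive", "mind", "representation"],
   ["russell", "definite description", "theory of descriptions"],
   ["empiric", "sense data", "experience", "observation", "induction"],
   ["psycho", "unconscious", "neurosis", "defense", "ocd", "anxiety"],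
   ["paradox", "sorites", "vagueness", "contradiction"]]

-- {t: p for p, terms in enumerate(_TERMS) for t in terms}
def pvFlat : List (String × Nat) :=
  (PySem.List.enumerate pvTermLists).flatMap (fun pl => pl.2.map (fun t => (t, pl.1.toNat)))

def pvTermPriority : PySem.Dict String Nat := PySem.Dict.ofList pvFlat

-- sorted({len(t) for t in _TERM_PRIORITY})
def pvLengths : List Nat :=
  PySem.List.sorted (PySem.Set.ofList (pvFlat.map (fun p => p.1.length))) (fun x => x) false

-- single left-to-right scan; dictionary window lookups at every position
def get_viewpoint_py_alt (rule : List (String × String)) : String :=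
  let combined := PySem.Chars.lower ((PySem.Dict.mk rule).getD "premise" "").toList
                  ++ [' '] ++ PySem.Chars.lower ((PySem.Dict.mk rule).getD "conclusion" "").toList
  let best := (PySem.List.pyRange 0 (combined.length : Int) 1).foldl
    (fun best i =>
      pvLengths.foldl
        (fun best (L : Nat) =>
          let p := pvTermPriority.getD
            (String.ofList (PySem.List.slice combined (some i) (some (i + (L : Int))))) best
          if p < best then p else best)
        best)
    pvLabels.length
  if best < pvLabels.length then pvLabels.getD best "analytical" else "analytical"

-- ===== PRECONDITION & SPEC =====
def Spec_get_viewpoint_py (rule : List (String × String)) (out : String) : Prop := out = get_viewpoint_py_alt rule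
instance (rule : List (String × String)) (out : String) : Decidable (Spec_get_viewpoint_py rule out) := by unfold Spec_get_viewpoint_py; infer_instance

-- ===== CLAIM (what is proved, stated in full; the proofs are below) =====
def Claim_equal_get_viewpoint_py : Prop := ∀ (rule : List (String × String)), Dom_get_viewpoint_py rule → Spec_get_viewpoint_py rule (get_viewpoint_py rule)

-- ===== LEMMAS AND PROOFS =====

-- the flat dictionary contents, written out
def pvFlatLit : List (String × Nat) :=
  [("proposition", 0), ("meaning", 0), ("semantic", 0), ("reference", 0), ("sense", 0), ("denotation", 0), ("intension", 0),
   ("knowledge", 1), ("belief", 1), ("justif", 1), ("a priori", 1), ("apriori", 1), ("epistemic", 1), ("certainty", 1),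
   ("exist", 2), ("being", 2), ("identity", 2), ("property", 2), ("modal", 2), ("possible world", 2), ("essence", 2), ("ontolog", 2),
   ("logic", 3), ("valid", 3), ("inference", 3), ("deduct", 3), ("proof", 3), ("theorem", 3), ("axiom", 3), ("incompleteness", 3),
   ("mental", 4), ("consciousness", 4), ("intentional", 4), ("thought", 4), ("cognitive", 4), ("mind", 4), ("representation", 4),
   ("russell", 5), ("definite description", 5), ("theory of descriptions", 5),
   ("empiric", 6), ("sense data", 6), ("experience", 6), ("observation", 6), ("induction", 6),
   ("psycho", 7), ("unconscious", 7), ("neurosis", 7), ("defense", 7), ("ocd", 7), ("anxiety", 7),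
   ("paradox", 8), ("sorites", 8), ("vagueness", 8), ("contradiction", 8)]

set_option maxRecDepth 8000 in
lemma pvTermPriority_eq : pvTermPriority = PySem.Dict.mk pvFlatLit := by decide

-- one update step of B's scan: look up, keep the smaller priority
def pvStep {α : Type} (F : α → Option Nat) (b : Nat) (x : α) : Nat :=
  match F x with
  | some p => if p < b then p else b
  | none => b

def pvKey (combined : List Char) (i : Int) (L : Nat) : String :=
  String.ofList (PySem.List.slice combined (some i) (some (i + (L : Int))))

def pvF (combined : List Char) (pr : Int × Nat) : Option Nat :=
  pvTermPriority.get? (pvKey combined pr.1 pr.2)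

def pvPairs (n : Nat) : List (Int × Nat) :=
  (PySem.List.pyRange 0 (n : Int) 1).flatMap (fun i => pvLengths.map (fun L => (i, L)))

def pvCond (k : Nat) (combined : List Char) : Bool :=
  (pvTermLists.getD k []).any (fun t => PySem.Chars.isIn t.toList combined)

def pvChain (combined : List Char) : Nat :=
  if pvCond 0 combined then 0 else if pvCond 1 combined then 1 else if pvCond 2 combined then 2
  else if pvCond 3 combined then 3 else if pvCond 4 combined then 4 else if pvCond 5 combined then 5
  else if pvCond 6 combined then 6 else if pvCond 7 combined then 7 else if pvCond 8 combined then 8 else 9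

lemma pvFold_spec {α : Type} (F : α → Option Nat) (l : List α) (b : Nat) :
    l.foldl (pvStep F) b ≤ b ∧
    (∀ x ∈ l, ∀ p, F x = some p → l.foldl (pvStep F) b ≤ p) ∧
    (l.foldl (pvStep F) b = b ∨ ∃ x ∈ l, F x = some (l.foldl (pvStep F) b)) := by
  induction l generalizing b with
  | nil => simp
  | cons a t ih =>
    simp only [List.foldl_cons]
    obtain ⟨h1, h2, h3⟩ := ih (pvStep F b a)
    have hstep : pvStep F b a ≤ b := by
      unfold pvStep; cases h : F a with
      | none => exact le_refl b
      | some p => simp only []; split_ifs with hp <;> omega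
    refine ⟨le_trans h1 hstep, ?_, ?_⟩
    · intro x hx p hp
      rcases List.mem_cons.mp hx with hx | hx
      · subst hx
        have : pvStep F b x ≤ p := by
          unfold pvStep; rw [hp]; simp only []; split_ifs with h <;> omega
        exact le_trans h1 this
      · exact h2 x hx p hp
    · rcases h3 with h3 | ⟨x, hx, hFx⟩
      · rw [h3]
        cases h : F a with
        | none => left; unfold pvStep; rw [h]
        | some p =>
          unfold pvStep; rw [h]
          simp only []
          split_ifs with hp
          · right; exact ⟨a, List.mem_cons_self .., h⟩
          · left; rfl
      · right; exact ⟨x, List.mem_cons_of_mem _ hx, hFx⟩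

lemma pvFoldl_flatMap {α β γ : Type} (h : γ → List α) (g : β → α → β) (l : List γ) (b : β) :
    (l.flatMap h).foldl g b = l.foldl (fun b x => (h x).foldl g b) b := by
  induction l generalizing b with
  | nil => rfl
  | cons a t ih => simp [List.flatMap_cons, List.foldl_append, ih]

set_option maxRecDepth 16000 in
lemma pvBest_eq (combined : List Char) :
    (PySem.List.pyRange 0 (combined.length : Int) 1).foldl
      (fun best i =>
        pvLengths.foldl
          (fun best (L : Nat) =>
            let p := pvTermPriority.getD
              (String.ofList (PySem.List.slice combined (some i) (some (i + (L : Int))))) best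
            if p < best then p else best)
          best)
      pvLabels.length
    = (pvPairs combined.length).foldl (pvStep (pvF combined)) 9 := by
  have hinner : ∀ (b : Nat) (i : Int),
      pvLengths.foldl
        (fun best (L : Nat) =>
          let p := pvTermPriority.getD
            (String.ofList (PySem.List.slice combined (some i) (some (i + (L : Int))))) best
          if p < best then p else best)
        b
      = (pvLengths.map (fun L => (i, L))).foldl (pvStep (pvF combined)) b := by
    intro b i
    rw [List.foldl_map]
    apply PySem.List.foldl_congr_mem
    intro acc L _
    unfold pvStep pvF pvKey
    cases h : pvTermPriority.get? (String.ofList (PySem.List.slice combined (some i) (some (i + (L : Int))))) with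
    | none => simp only [PySem.Dict.getD, h, Option.getD]; simp
    | some p => simp only [PySem.Dict.getD, h, Option.getD]
  rw [pvPairs, pvFoldl_flatMap]
  have h9 : pvLabels.length = 9 := rfl
  rw [h9]
  apply PySem.List.foldl_congr_mem
  intro acc i _
  exact hinner acc i

lemma pvMk_get?_mem {l : List (String × Nat)} {s : String} {p : Nat}
    (h : (PySem.Dict.mk l).get? s = some p) : (s, p) ∈ l := by
  induction l with
  | nil => simp [PySem.Dict.get?] at h
  | cons a t ih =>
    obtain ⟨k, v⟩ := a
    rw [PySem.Dict.get?_mk_cons] at h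
    by_cases hks : k == s
    · rw [if_pos hks] at h
      obtain rfl : v = p := by injection h
      obtain rfl : k = s := eq_of_beq hks
      exact List.mem_cons_self ..
    · rw [if_neg (by simpa using hks)] at h
      exact List.mem_cons_of_mem _ (ih h)

lemma pvMk_get?_of_mem {l : List (String × Nat)} {s : String} {p : Nat}
    (hnd : (l.map Prod.fst).Nodup) (h : (s, p) ∈ l) : (PySem.Dict.mk l).get? s = some p := by
  induction l with
  | nil => simp at h
  | cons a t ih =>
    obtain ⟨k, v⟩ := a
    rw [PySem.Dict.get?_mk_cons]
    rcases List.mem_cons.mp h with heq | hmem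
    · obtain ⟨rfl, rfl⟩ : k = s ∧ v = p := Prod.mk.injEq .. ▸ heq.symm
      rw [if_pos (by simp)]
    · have hk : k ≠ s := by
        intro hks
        subst hks
        exact (List.nodup_cons.mp hnd).1 (List.mem_map.mpr ⟨(k, p), hmem, rfl⟩)
      rw [if_neg (by simpa using hk)]
      exact ih (List.nodup_cons.mp hnd).2 hmem

set_option maxRecDepth 16000 in
lemma pvGet?_mem {s : String} {p : Nat} (h : pvTermPriority.get? s = some p) : (s, p) ∈ pvFlatLit := by
  rw [pvTermPriority_eq] at h
  exact pvMk_get?_mem h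

set_option maxRecDepth 16000 in
lemma pvMem_get? {s : String} {p : Nat} (h : (s, p) ∈ pvFlatLit) : pvTermPriority.get? s = some p := by
  rw [pvTermPriority_eq]
  exact pvMk_get?_of_mem (by decide) h

set_option maxRecDepth 100000 in
lemma pvFlat_shape {s : String} {p : Nat} (h : (s, p) ∈ pvFlatLit) :
    p < 9 ∧ s ∈ pvTermLists.getD p [] ∧ s.toList ≠ [] ∧ s.toList.length ∈ pvLengths := by
  fin_cases h <;> decide

set_option maxRecDepth 100000 in
lemma pvList_flat {t : String} {k : Nat} (hk : k < 9) (h : t ∈ pvTermLists.getD k []) :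
    (t, k) ∈ pvFlatLit := by
  interval_cases k <;> fin_cases h <;> decide

lemma pvM_iff (combined : List Char) (k : Nat) :
    (∃ pr ∈ pvPairs combined.length, pvF combined pr = some k) ↔ (k < 9 ∧ pvCond k combined = true) := by
  constructor
  · rintro ⟨⟨i, L⟩, hmem, hF⟩
    have hi : 0 ≤ i ∧ i < (combined.length : Int) := by
      rw [pvPairs] at hmem
      rcases List.mem_flatMap.mp hmem with ⟨i', hi', hmap⟩
      rcases List.mem_map.mp hmap with ⟨L', _, heq⟩
      obtain rfl : i' = i := congrArg Prod.fst heq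
      exact (PySem.List.mem_pyRange_one).mp hi'
    obtain ⟨hi0, hilt⟩ := hi
    have hkey := pvGet?_mem hF
    obtain ⟨hk9, hmemL, hne, -⟩ := pvFlat_shape hkey
    refine ⟨hk9, ?_⟩
    unfold pvCond
    rw [List.any_eq_true]
    refine ⟨pvKey combined i L, hmemL, ?_⟩
    rw [← PySem.Chars.exists_prefix_drop_iff_isIn]
    lift i to ℕ using hi0 with j
    refine ⟨j, ?_⟩
    have hlist : (pvKey combined (j : Int) L).toList = (combined.drop j).take L := by
      unfold pvKey
      rw [PySem.List.slice_natCast_add, String.toList_ofList]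
    rw [hlist]
    exact List.take_prefix _ _
  · rintro ⟨hk9, hcond⟩
    unfold pvCond at hcond
    rw [List.any_eq_true] at hcond
    obtain ⟨t, htmem, hisin⟩ := hcond
    have hflat := pvList_flat hk9 htmem
    obtain ⟨-, -, hne, hlen⟩ := pvFlat_shape hflat
    obtain ⟨j, hpre⟩ := (PySem.Chars.exists_prefix_drop_iff_isIn _ _).mpr hisin
    have hj : j < combined.length := by
      by_contra hc
      rw [List.drop_eq_nil_of_le (le_of_not_gt hc)] at hpre
      exact hne (List.prefix_nil.mp hpre)
    refine ⟨((j : Int), t.toList.length), ?_, ?_⟩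
    · rw [pvPairs]
      refine List.mem_flatMap.mpr ⟨(j : Int), ?_, List.mem_map.mpr ⟨t.toList.length, hlen, rfl⟩⟩
      exact (PySem.List.mem_pyRange_one).mpr ⟨by positivity, by exact_mod_cast hj⟩
    · unfold pvF pvKey
      have hslice : PySem.List.slice combined (some (j : Int)) (some ((j : Int) + (t.toList.length : Int)))
          = t.toList := by
        rw [PySem.List.slice_natCast_add]
        exact (List.prefix_iff_eq_take.mp hpre).symm
      rw [hslice, String.ofList_toList]
      exact pvMem_get? hflat

set_option maxRecDepth 16000 in
lemma pvBest_eq_chain (combined : List Char) :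
    (pvPairs combined.length).foldl (pvStep (pvF combined)) 9 = pvChain combined := by
  obtain ⟨hle9, hub, hmem⟩ := pvFold_spec (pvF combined) (pvPairs combined.length) 9
  generalize hgen : (pvPairs combined.length).foldl (pvStep (pvF combined)) 9 = r at hle9 hub hmem ⊢
  have hMr : r = 9 ∨ (r < 9 ∧ pvCond r combined = true) := by
    rcases hmem with h | ⟨x, hx, hFx⟩
    · exact Or.inl h
    · exact Or.inr ((pvM_iff combined r).mp ⟨x, hx, hFx⟩)
  have hCk : ∀ k : Nat, k < 9 → pvCond k combined = true → r ≤ k := by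
    intro k hk hc
    obtain ⟨x, hx, hFx⟩ := (pvM_iff combined k).mpr ⟨hk, hc⟩
    exact hub x hx k hFx
  unfold pvChain
  split_ifs with h0 h1 h2 h3 h4 h5 h6 h7 h8
  · have hub' := hCk 0 (by omega) h0
    rcases hMr with rfl | ⟨hr9, hcr⟩
    · omega
    · interval_cases r
      simp_all
  · have hub' := hCk 1 (by omega) h1
    rcases hMr with rfl | ⟨hr9, hcr⟩
    · omega
    · interval_cases r <;> simp_all
  · have hub' := hCk 2 (by omega) h2
    rcases hMr with rfl | ⟨hr9, hcr⟩
    · omega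
    · interval_cases r <;> simp_all
  · have hub' := hCk 3 (by omega) h3
    rcases hMr with rfl | ⟨hr9, hcr⟩
    · omega
    · interval_cases r <;> simp_all
  · have hub' := hCk 4 (by omega) h4
    rcases hMr with rfl | ⟨hr9, hcr⟩
    · omega
    · interval_cases r <;> simp_all
  · have hub' := hCk 5 (by omega) h5
    rcases hMr with rfl | ⟨hr9, hcr⟩
    · omega
    · interval_cases r <;> simp_all
  · have hub' := hCk 6 (by omega) h6
    rcases hMr with rfl | ⟨hr9, hcr⟩
    · omega
    · interval_cases r <;> simp_all
  · have hub' := hCk 7 (by omega) h7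
    rcases hMr with rfl | ⟨hr9, hcr⟩
    · omega
    · interval_cases r <;> simp_all
  · have hub' := hCk 8 (by omega) h8
    rcases hMr with rfl | ⟨hr9, hcr⟩
    · omega
    · interval_cases r <;> simp_all
  · rcases hMr with rfl | ⟨hr9, hcr⟩
    · rfl
    · interval_cases r <;> simp_all

-- ===== VERDICT (by name: the statement is the Claim_ definition above) =====
set_option maxHeartbeats 1000000 in
lemma pvRender (combined : List Char) :
    (if pvChain combined < 9 then pvLabels.getD (pvChain combined) "analytical" else "analytical")
    =
    if (["proposition", "meaning", "semantic", "reference", "sense", "denotation", "intension"] : List String).any (fun t => PySem.Chars.isIn t.toList combined) then "semantic"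
    else if (["knowledge", "belief", "justif", "a priori", "apriori", "epistemic", "certainty"] : List String).any (fun t => PySem.Chars.isIn t.toList combined) then "epistemological"
    else if (["exist", "being", "identity", "property", "modal", "possible world", "essence", "ontolog"] : List String).any (fun t => PySem.Chars.isIn t.toList combined) then "metaphysical"
    else if (["logic", "valid", "inference", "deduct", "proof", "theorem", "axiom", "incompleteness"] : List String).any (fun t => PySem.Chars.isIn t.toList combined) then "logical"
    else if (["mental", "consciousness", "intentional", "thought", "cognitive", "mind", "representation"] : List String).any (fun t => PySem.Chars.isIn t.toList combined) then "philosophy of mind"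
    else if (["russell", "definite description", "theory of descriptions"] : List String).any (fun t => PySem.Chars.isIn t.toList combined) then "anti-Russellian"
    else if (["empiric", "sense data", "experience", "observation", "induction"] : List String).any (fun t => PySem.Chars.isIn t.toList combined) then "rationalist"
    else if (["psycho", "unconscious", "neurosis", "defense", "ocd", "anxiety"] : List String).any (fun t => PySem.Chars.isIn t.toList combined) then "psychological"
    else if (["paradox", "sorites", "vagueness", "contradiction"] : List String).any (fun t => PySem.Chars.isIn t.toList combined) then "paradox-theoretical"
    else "analytical" := by
  by_cases h0 : (["proposition", "meaning", "semantic", "reference", "sense", "denotation", "intension"] : List String).any (fun t => PySem.Chars.isIn t.toList combined) = true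
  · simp [pvChain, pvCond, pvTermLists, pvLabels, h0]
  by_cases h1 : (["knowledge", "belief", "justif", "a priori", "apriori", "epistemic", "certainty"] : List String).any (fun t => PySem.Chars.isIn t.toList combined) = true
  · simp [pvChain, pvCond, pvTermLists, pvLabels, h0, h1]
  by_cases h2 : (["exist", "being", "identity", "property", "modal", "possible world", "essence", "ontolog"] : List String).any (fun t => PySem.Chars.isIn t.toList combined) = true
  · simp [pvChain, pvCond, pvTermLists, pvLabels, h0, h1, h2]
  by_cases h3 : (["logic", "valid", "inference", "deduct", "proof", "theorem", "axiom", "incompleteness"] : List String).any (fun t => PySem.Chars.isIn t.toList combined) = true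
  · simp [pvChain, pvCond, pvTermLists, pvLabels, h0, h1, h2, h3]
  by_cases h4 : (["mental", "consciousness", "intentional", "thought", "cognitive", "mind", "representation"] : List String).any (fun t => PySem.Chars.isIn t.toList combined) = true
  · simp [pvChain, pvCond, pvTermLists, pvLabels, h0, h1, h2, h3, h4]
  by_cases h5 : (["russell", "definite description", "theory of descriptions"] : List String).any (fun t => PySem.Chars.isIn t.toList combined) = true
  · simp [pvChain, pvCond, pvTermLists, pvLabels, h0, h1, h2, h3, h4, h5]
  by_cases h6 : (["empiric", "sense data", "experience", "observation", "induction"] : List String).any (fun t => PySem.Chars.isIn t.toList combined) = true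
  · simp [pvChain, pvCond, pvTermLists, pvLabels, h0, h1, h2, h3, h4, h5, h6]
  by_cases h7 : (["psycho", "unconscious", "neurosis", "defense", "ocd", "anxiety"] : List String).any (fun t => PySem.Chars.isIn t.toList combined) = true
  · simp [pvChain, pvCond, pvTermLists, pvLabels, h0, h1, h2, h3, h4, h5, h6, h7]
  by_cases h8 : (["paradox", "sorites", "vagueness", "contradiction"] : List String).any (fun t => PySem.Chars.isIn t.toList combined) = true
  · simp [pvChain, pvCond, pvTermLists, pvLabels, h0, h1, h2, h3, h4, h5, h6, h7, h8]
  simp [pvChain, pvCond, pvTermLists, h0, h1, h2, h3, h4, h5, h6, h7, h8]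

set_option maxHeartbeats 2000000 in
theorem get_viewpoint_py_spec : Claim_equal_get_viewpoint_py := by
  intro rule _
  unfold Spec_get_viewpoint_py get_viewpoint_py get_viewpoint_py_alt
  simp only []
  generalize (PySem.Chars.lower ((PySem.Dict.mk rule).getD "premise" "").toList
      ++ [' '] ++ PySem.Chars.lower ((PySem.Dict.mk rule).getD "conclusion" "").toList) = combined
  rw [pvBest_eq combined, pvBest_eq_chain combined]
  have h9 : pvLabels.length = 9 := rfl
  rw [h9]
  exact (pvRender combined).symm
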